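-- pv_equiv track=rewrite | github.com/yujinHan97/Algorithm | 괄호 변환.py | solution
-- ===== SOURCE A (Python) =====
-- def isPerfect(p):
--     stack = []
--
--     for i in range(len(p)):
--         if p[i] == '(':
--             stack.append(p[i])
--         elif p[i] == ')':
--             if stack:
--                 stack.pop()
--
--     if len(stack) == 0:
--         return True
--     else:
--         return False
--
-- def sepUandV(p):
--     u, v = '', ''
--     for i in range(len(p)):
--         u += p[i]
--
--         if u.count('(') == u.count(')'):
--             index = i
--             break
--
--     if index == len(p) - 1:
--         v = ''
--     else:
--         v = p[index+1:]
--
--     return u, v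
--
-- def solution(p):
--     answer = ''
--
--     # 1단계
--     if p == '':
--         return ''
--
--     # 2단계
--     U, V = sepUandV(p)
--
--     # 3단계
--     if isPerfect(U):
--         # 3-1단계
--         return U + solution(V)
--
--     # 4단계
--     else:
--         # 4-1단계
--         answer = '('
--         # 4-2단계
--         answer += solution(V)
--         # 4-3단계
--         answer += ')'
--         # 4-4단계
--         U = U[1:-1]
--         for i in range(len(U)):
--             if U[i] == '(':
--                 answer += ')'
--             elif U[i] == ')':
--                 answer += '('
--
--         # 4-5단계
--         return answer
-- ===== SOURCE B (Python) =====
-- def solution(p):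
--     FLIP = {'(': ')', ')': '('}
--     # pass 1: cut p into its minimal balanced chunks with one running counter
--     chunks = []
--     cur = ''
--     bal = 0
--     for c in p:
--         cur += c
--         if c == '(':
--             bal += 1
--         elif c == ')':
--             bal -= 1
--         if bal == 0:
--             chunks.append(cur)
--             cur = ''
--     # pass 2: rebuild iteratively right-to-left; a minimal balanced chunk is
--     # already correct exactly when it does not start with ')'
--     res = ''
--     for u in reversed(chunks):
--         if u[0] == ')':
--             res = '(' + res + ')' + ''.join(FLIP[c] for c in u[1:-1] if c in FLIP)
--         else:
--             res = u + res
--     return res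
-- ===== Notes on version B (the rewrite author's own statement) =====
-- stated objective: alternative
-- what changed: Replaces A's recursive split-and-recurse (with quadratic count() rescans and a stack-based isPerfect pass per level) by two flat passes: one linear balance-counter scan cuts the whole string into its minimal balanced chunks, then one iterative right-to-left fold over the chunk list rebuilds the answer, deciding each chunk's correctness purely by its first character instead of simulating a stack.
import Mathlib
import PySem

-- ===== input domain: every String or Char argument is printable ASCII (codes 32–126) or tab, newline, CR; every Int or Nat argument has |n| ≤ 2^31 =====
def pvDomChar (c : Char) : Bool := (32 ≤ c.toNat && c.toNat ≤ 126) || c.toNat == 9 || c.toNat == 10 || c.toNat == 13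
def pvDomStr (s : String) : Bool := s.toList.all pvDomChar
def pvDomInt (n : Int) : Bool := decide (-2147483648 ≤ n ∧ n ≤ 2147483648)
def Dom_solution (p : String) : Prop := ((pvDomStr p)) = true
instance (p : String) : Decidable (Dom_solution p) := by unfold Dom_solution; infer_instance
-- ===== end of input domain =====

-- B replaces A's recursion (which rescans prefix counts and simulates a stack per level)
-- by two flat passes: one balance-counter scan cutting p into minimal balanced chunks,
-- then an iterative right-to-left fold rebuilding the answer, a chunk being correct
-- exactly when it does not start with ')'. Objective: alternative.

-- ===== PORT A =====
-- sepUandV's loop: extend u one char at a time, break when '(' and ')' counts match;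
-- returns none when the loop finishes without a break (Python then raises UnboundLocalError
-- on the unbound `index`, excluded by Pre_solution).
def pvSepLoop : List Char → List Char → Option (List Char × List Char)
  | [], _ => none
  | c :: rest, u =>
    let u' := u ++ [c]
    if u'.count '(' = u'.count ')' then some (u', rest)
    else pvSepLoop rest u'

-- isPerfect's stack built by the for loop ('if stack: stack.pop()')
def pvStkStep (st : List Char) (c : Char) : List Char :=
  if c = '(' then st ++ [c]
  else if c = ')' then (if st.isEmpty then st else st.dropLast)
  else st

def pvStk (u : List Char) : List Char := u.foldl pvStkStep []

def pvIsPerfect (u : List Char) : Bool := (pvStk u).length == 0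

-- the 4-4 step loop appending flipped brackets to answer
def pvFlipA (u : List Char) : List Char :=
  u.foldl (fun acc c =>
    if c = '(' then acc ++ [')']
    else if c = ')' then acc ++ ['(']
    else acc) []

theorem pvSepLoop_length {rest u u' v : List Char}
    (h : pvSepLoop rest u = some (u', v)) : v.length < rest.length := by
  induction rest generalizing u with
  | nil => simp [pvSepLoop] at h
  | cons c r ih =>
    simp only [pvSepLoop] at h
    split at h
    · cases h; simp
    · exact Nat.lt_trans (ih h) (by simp)

def solutionList (l : List Char) : List Char :=
  if l = [] then []
  else
    match hsep : pvSepLoop l [] with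
    | none => []  -- Python raises UnboundLocalError here (unbound `index`); excluded by Pre_solution
    | some (u, v) =>
      if pvIsPerfect u then u ++ solutionList v
      else ('(' :: solutionList v ++ [')']) ++ pvFlipA ((u.drop 1).dropLast)
termination_by l.length
decreasing_by all_goals exact pvSepLoop_length hsep

def solution (p : String) : String := String.mk (solutionList p.toList)

-- ===== PORT B =====
-- pass 1 of Source B: the for loop over p cutting minimal balanced chunks (cur, bal)
def pvChunks : List Char → List Char → Int → List (List Char)
  | [], _, _ => []
  | c :: rest, cur, bal =>
    let cur' := cur ++ [c]
    let bal' := if c = '(' then bal + 1 else if c = ')' then bal - 1 else bal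
    if bal' = 0 then cur' :: pvChunks rest [] 0
    else pvChunks rest cur' bal'

-- ''.join(FLIP[c] for c in … if c in FLIP) of Source B
def pvFlipB (u : List Char) : List Char :=
  u.filterMap fun c =>
    if c = '(' then some ')' else if c = ')' then some '(' else none

-- pass 2 of Source B: one step of the right-to-left fold over the chunks
-- (chunks from pvChunks are never empty, so u[0] is ported as u.head?)
def pvStep (res : List Char) (u : List Char) : List Char :=
  if u.head? = some ')' then ('(' :: res ++ [')']) ++ pvFlipB ((u.drop 1).dropLast)
  else u ++ res

def solutionAltList (l : List Char) : List Char :=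
  ((pvChunks l [] 0).reverse).foldl pvStep []

def solution_alt (p : String) : String := String.mk (solutionAltList p.toList)

-- ===== PRECONDITION & SPEC =====
-- A raises UnboundLocalError (sepUandV's `index` stays unbound) exactly on the nonempty
-- inputs whose open- and close-paren counts differ; Pre_ admits precisely the inputs on
-- which A returns.
def Pre_solution (p : String) : Prop := p.toList.count '(' = p.toList.count ')'
instance (p : String) : Decidable (Pre_solution p) := by unfold Pre_solution; infer_instance
def pvWitness_solution : String := "(()())"

def Spec_solution (p : String) (out : String) : Prop := out = solution_alt p
instance (p : String) (out : String) : Decidable (Spec_solution p out) := by unfold Spec_solution; infer_instance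

-- ===== CLAIM (what is proved, stated in full; the proofs are below) =====
def Claim_equal_solution : Prop := ∀ (p : String), Dom_solution p → Pre_solution p → Spec_solution p (solution p)

-- ===== LEMMAS AND PROOFS =====
def pvDiff (l : List Char) : Int := (l.count '(' : Int) - (l.count ')' : Int)

theorem pvDiff_nil : pvDiff [] = 0 := by simp [pvDiff]

theorem pvDiff_append (a b : List Char) : pvDiff (a ++ b) = pvDiff a + pvDiff b := by
  simp [pvDiff]; push_cast; ring

theorem pvDiff_single (c : Char) :
    pvDiff [c] = (if c = '(' then 1 else if c = ')' then -1 else 0) := by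
  by_cases h1 : c = '(' <;> by_cases h2 : c = ')' <;> simp_all [pvDiff]

theorem pvCount_eq_iff (u : List Char) :
    (u.count '(' = u.count ')') ↔ pvDiff u = 0 := by
  unfold pvDiff; omega

theorem pvFlip_eq (u : List Char) : pvFlipA u = pvFlipB u := by
  suffices h : ∀ (u acc : List Char),
      u.foldl (fun acc c =>
        if c = '(' then acc ++ [')'] else if c = ')' then acc ++ ['('] else acc) acc
      = acc ++ pvFlipB u by
    simpa using h u []
  intro u
  induction u with
  | nil => simp [pvFlipB]
  | cons c r ih =>
    intro acc
    by_cases h1 : c = '(' <;> by_cases h2 : c = ')' <;> simp_all [pvFlipB]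

-- A's sepUandV loop and B's chunk cutter break at the same (first) index
theorem pvChunkSep : ∀ (rest cur : List Char), rest ≠ [] →
    pvDiff cur + pvDiff rest = 0 →
    ∃ k : Nat, k < rest.length ∧
      pvSepLoop rest cur = some (cur ++ rest.take (k+1), rest.drop (k+1)) ∧
      pvChunks rest cur (pvDiff cur)
        = (cur ++ rest.take (k+1)) :: pvChunks (rest.drop (k+1)) [] 0 ∧
      pvDiff (cur ++ rest.take (k+1)) = 0 ∧
      (∀ j : Nat, 0 < j → j ≤ k → pvDiff (cur ++ rest.take j) ≠ 0) := by
  intro rest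
  induction rest with
  | nil => intro cur h; exact absurd rfl h
  | cons c rest' ih =>
    intro cur _ hdiff
    have hb' : pvDiff (cur ++ [c])
        = pvDiff cur + (if c = '(' then 1 else if c = ')' then -1 else 0) := by
      rw [pvDiff_append, pvDiff_single]
    have hbal : (if c = '(' then pvDiff cur + 1 else if c = ')' then pvDiff cur - 1 else pvDiff cur)
        = pvDiff (cur ++ [c]) := by
      rw [hb']; split_ifs <;> ring
    by_cases hb0 : pvDiff (cur ++ [c]) = 0
    · refine ⟨0, by simp, ?_, ?_, by simpa using hb0, by omega⟩
      · simp only [pvSepLoop]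
        rw [if_pos ((pvCount_eq_iff _).2 (by simpa using hb0))]
        simp
      · simp only [pvChunks, hbal]
        rw [if_pos hb0]
        simp
    · have hdtail : pvDiff (cur ++ [c]) + pvDiff rest' = 0 := by
        have h1 : pvDiff (c :: rest') = pvDiff [c] + pvDiff rest' := pvDiff_append [c] rest'
        rw [pvDiff_single] at h1
        rw [h1] at hdiff
        omega
      have hne' : rest' ≠ [] := by
        intro h; subst h; rw [pvDiff_nil] at hdtail; omega
      obtain ⟨k', hk', hsep, hch, hz, hmin⟩ := ih (cur ++ [c]) hne' hdtail
      refine ⟨k' + 1, by simp; omega, ?_, ?_, ?_, ?_⟩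
      · simp only [pvSepLoop]
        rw [if_neg (fun h => hb0 (by simpa using (pvCount_eq_iff _).1 h))]
        rw [hsep]
        congr 2 <;> simp [List.take_succ_cons, List.drop_succ_cons]
      · simp only [pvChunks, hbal]
        rw [if_neg hb0]
        have ht : cur ++ (c :: rest').take (k' + 1 + 1) = (cur ++ [c]) ++ rest'.take (k' + 1) := by
          simp [List.take_succ_cons]
        have hdp : (c :: rest').drop (k' + 1 + 1) = rest'.drop (k' + 1) := by simp
        rw [ht, hdp]
        exact hch
      · have : cur ++ (c :: rest').take (k' + 1 + 1) = (cur ++ [c]) ++ rest'.take (k' + 1) := by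
          simp [List.take_succ_cons]
        rw [this]; exact hz
      · intro j hj hjk
        cases j with
        | zero => omega
        | succ j' =>
          have heq : cur ++ (c :: rest').take (j' + 1) = (cur ++ [c]) ++ rest'.take j' := by
            simp [List.take_succ_cons]
          rw [heq]
          cases Nat.eq_zero_or_pos j' with
          | inl h0 => subst h0; simpa using hb0
          | inr hpos => exact hmin j' hpos (by omega)

-- stack length is at least the running balance
theorem pvStk_lb : ∀ (w st : List Char),
    ((w.foldl pvStkStep st).length : Int) ≥ st.length + pvDiff w := by
  intro w
  induction w with
  | nil => intro st; simp [pvDiff_nil]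
  | cons c w' ih =>
    intro st
    have hstep : ((pvStkStep st c).length : Int) ≥ st.length + pvDiff [c] := by
      rw [pvDiff_single]; unfold pvStkStep
      by_cases h1 : c = '(' <;> by_cases h2 : c = ')' <;>
        simp_all [List.length_dropLast] <;> split_ifs <;> simp_all <;> omega
    have hsplit : pvDiff (c :: w') = pvDiff [c] + pvDiff w' := pvDiff_append [c] w'
    calc ((((c :: w').foldl pvStkStep st)).length : Int)
        = ((w'.foldl pvStkStep (pvStkStep st c)).length : Int) := by simp [List.foldl_cons]
      _ ≥ (pvStkStep st c).length + pvDiff w' := ih _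
      _ ≥ st.length + pvDiff [c] + pvDiff w' := by omega
      _ = st.length + pvDiff (c :: w') := by rw [hsplit]; ring

-- if every prefix balance is nonnegative, the stack length equals the balance
theorem pvStk_exact : ∀ (u : List Char),
    (∀ j : Nat, j ≤ u.length → 0 ≤ pvDiff (u.take j)) →
    ((pvStk u).length : Int) = pvDiff u := by
  intro u
  induction u using List.reverseRecOn with
  | nil => simp [pvStk, pvDiff_nil]
  | append_singleton w c ih =>
    intro hpre
    have hw : ∀ j : Nat, j ≤ w.length → 0 ≤ pvDiff (w.take j) := by
      intro j hj
      have := hpre j (by simp; omega)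
      rwa [List.take_append_of_le_length hj] at this
    have hiw : ((pvStk w).length : Int) = pvDiff w := ih hw
    have hfull := hpre (w ++ [c]).length le_rfl
    rw [List.take_length] at hfull
    have hstk : pvStk (w ++ [c]) = pvStkStep (pvStk w) c := by
      simp [pvStk, List.foldl_append]
    rw [hstk, pvDiff_append, pvDiff_single]
    rw [pvDiff_append, pvDiff_single] at hfull
    by_cases h2 : c = ')'
    · have hc1 : ('(' : Char) ≠ ')' := by decide
      have h1 : c ≠ '(' := by intro h; rw [h] at h2; exact hc1 h2
      have hw1 : 1 ≤ pvDiff w := by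
        rw [if_neg h1, if_pos h2] at hfull; omega
      have hne : ¬ (pvStk w).isEmpty := by
        simp [List.isEmpty_iff]
        intro h
        rw [h] at hiw
        simp at hiw
        omega
      unfold pvStkStep
      rw [if_neg h1, if_pos h2, if_neg hne, if_neg h1, if_pos h2]
      have hpos : 1 ≤ (pvStk w).length := by
        by_contra h
        have h0 : (pvStk w).length = 0 := by omega
        exact hne (by simpa [List.isEmpty_iff, List.length_eq_zero_iff] using h0)
      rw [List.length_dropLast]
      push_cast
      omega
    · by_cases h1 : c = '('
      · unfold pvStkStep
        rw [if_pos h1, if_pos h1]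
        simp
        omega
      · unfold pvStkStep
        rw [if_neg h1, if_neg h2, if_neg h1, if_neg h2]
        omega

-- a minimal balanced chunk is perfect exactly when it does not start with ')'
theorem pvHeadPerfect (u : List Char) (hne : u ≠ []) (hd : pvDiff u = 0)
    (hmin : ∀ j : Nat, 0 < j → j < u.length → pvDiff (u.take j) ≠ 0) :
    (pvIsPerfect u = true ↔ u.head? ≠ some ')') := by
  obtain ⟨c, w, rfl⟩ : ∃ c w, u = c :: w := by
    cases u with
    | nil => exact absurd rfl hne
    | cons c w => exact ⟨c, w, rfl⟩
  by_cases hc : c = ')'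
  · subst hc
    -- stack ignores the leading ')'; remaining balance is 1, so stack ends nonempty
    have hw1 : pvDiff w = 1 := by
      have := pvDiff_append [')'] w
      rw [pvDiff_single] at this
      simp at this
      omega
    have hstk : pvStk (')' :: w) = w.foldl pvStkStep [] := by
      simp [pvStk, List.foldl_cons, pvStkStep]
    have hlb := pvStk_lb w []
    rw [hw1] at hlb
    simp at hlb
    constructor
    · intro hperf
      exfalso
      simp [pvIsPerfect, hstk, List.length_eq_zero_iff] at hperf
      rw [hperf] at hlb
      simp at hlb
    · intro h; simp at h
  · -- head is not ')': every prefix balance is nonnegative, stack ends empty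
    have hpre : ∀ j : Nat, j ≤ (c :: w).length → 0 ≤ pvDiff ((c :: w).take j) := by
      intro j hj
      induction j with
      | zero => simp [pvDiff_nil]
      | succ j' ihj =>
        have hle : 0 ≤ pvDiff ((c :: w).take j') := ihj (by omega)
        by_cases h0 : pvDiff ((c :: w).take j') = 0
        · -- minimality forces j' = 0
          have hj0 : j' = 0 := by
            by_contra hne'
            exact hmin j' (Nat.pos_of_ne_zero hne') (by omega) h0
          subst hj0
          have h1 : (c :: w).take 1 = [c] := by simp
          rw [h1, pvDiff_single]
          split_ifs <;> simp_all
        · have hlt : j' < (c :: w).length := by omega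
          have htk : (c :: w).take (j' + 1) = (c :: w).take j' ++ [(c :: w)[j']] := by
            rw [List.take_add_one, List.getElem?_eq_getElem hlt]
            rfl
          have hstep : pvDiff ((c :: w).take (j' + 1))
              ≥ pvDiff ((c :: w).take j') - 1 := by
            rw [htk, pvDiff_append, pvDiff_single]
            split_ifs <;> omega
          omega
    have hlen := pvStk_exact (c :: w) hpre
    rw [hd] at hlen
    have hlen0 : (pvStk (c :: w)).length = 0 := by exact_mod_cast hlen
    constructor
    · intro _; simp [hc]
    · intro _
      unfold pvIsPerfect
      rw [hlen0]
      rfl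

-- fold over the reversed chunk list peels the first chunk last
theorem pvBuild_cons (u : List Char) (cs : List (List Char)) :
    ((u :: cs).reverse).foldl pvStep [] = pvStep ((cs.reverse).foldl pvStep []) u := by
  simp [List.foldl_append]

theorem pvMain : ∀ (n : Nat) (l : List Char), l.length ≤ n → pvDiff l = 0 →
    solutionList l = solutionAltList l := by
  intro n
  induction n with
  | zero =>
    intro l hl _
    have h0 : l = [] := List.eq_nil_of_length_eq_zero (Nat.le_zero.1 hl)
    subst h0
    simp [solutionList, solutionAltList, pvChunks]
  | succ n ih =>
    intro l hl hd
    cases hcase : l with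
    | nil => simp [solutionList, solutionAltList, pvChunks]
    | cons c cs =>
      subst hcase
      obtain ⟨k, hk, hsep, hch, hz, hmin⟩ :=
        pvChunkSep (c :: cs) [] (by simp) (by simpa [pvDiff_nil] using hd)
      simp only [List.nil_append, pvDiff_nil] at hsep hch hz hmin
      have hsplit := pvDiff_append ((c :: cs).take (k + 1)) ((c :: cs).drop (k + 1))
      rw [List.take_append_drop] at hsplit
      have hvd : pvDiff ((c :: cs).drop (k + 1)) = 0 := by omega
      have hvl : ((c :: cs).drop (k + 1)).length ≤ n := by
        rw [List.length_drop]
        simp only [List.length_cons] at hl ⊢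
        omega
      have hune : (c :: cs).take (k + 1) ≠ [] := by simp [List.take_succ_cons]
      have hulen : ((c :: cs).take (k + 1)).length = k + 1 := by
        rw [List.length_take]
        simp only [List.length_cons] at hk ⊢
        omega
      have humin : ∀ j : Nat, 0 < j →
          j < ((c :: cs).take (k + 1)).length →
          pvDiff (((c :: cs).take (k + 1)).take j) ≠ 0 := by
        intro j hj hjl
        rw [hulen] at hjl
        rw [List.take_take]
        have hmj : min j (k + 1) = j := by omega
        rw [hmj]
        exact hmin j hj (by omega)
      have hperf := pvHeadPerfect _ hune hz humin
      have hrec : solutionList ((c :: cs).drop (k + 1))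
          = solutionAltList ((c :: cs).drop (k + 1)) := ih _ hvl hvd
      have hBne : (c :: cs : List Char) ≠ [] := by simp
      rw [solutionList, if_neg hBne, hsep]
      show (if pvIsPerfect ((c :: cs).take (k + 1)) then
              (c :: cs).take (k + 1) ++ solutionList ((c :: cs).drop (k + 1))
            else ('(' :: solutionList ((c :: cs).drop (k + 1)) ++ [')']) ++
              pvFlipA ((((c :: cs).take (k + 1)).drop 1).dropLast)) = _
      unfold solutionAltList
      rw [hch, pvBuild_cons]
      by_cases hh : ((c :: cs).take (k + 1)).head? = some ')'
      · have hpf : pvIsPerfect ((c :: cs).take (k + 1)) = false := by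
          cases hpv : pvIsPerfect ((c :: cs).take (k + 1)) with
          | true => exact absurd hh (hperf.1 hpv)
          | false => rfl
        rw [if_neg (by rw [hpf]; simp), pvStep, if_pos hh, pvFlip_eq, hrec]
        rfl
      · have hpf : pvIsPerfect ((c :: cs).take (k + 1)) = true := hperf.2 hh
        rw [if_pos hpf, pvStep, if_neg hh, hrec]
        rfl

-- ===== VERDICT (by name: the statement is the Claim_ definition above) =====
theorem solution_spec : Claim_equal_solution := by
  intro p _ hpre
  show solution p = solution_alt p
  unfold solution solution_alt
  exact congrArg String.mk
    (pvMain p.toList.length p.toList le_rfl ((pvCount_eq_iff _).1 hpre))
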